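-- pv_equiv track=rewrite | github.com/sunaminusone/email_agent | src/execution/status.py | final_status_for_calls
-- ===== SOURCE A (Python) =====
-- def final_status_for_calls(statuses: list[str]) -> str:
--     if not statuses:
--         return "empty"
--     if any(status == "error" for status in statuses):
--         return "error"
--     if any(status == "partial" for status in statuses):
--         return "partial"
--     if any(status == "ok" for status in statuses):
--         return "ok"
--     return "empty"
-- ===== SOURCE B (Python) =====
-- def final_status_for_calls(statuses: list[str]) -> str:
--     rank = {"error": 1, "partial": 2, "ok": 3}
--     best = 4
--     for s in statuses:
--         r = rank.get(s, 4)
--         if r < best: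
--             best = r
--     return {1: "error", 2: "partial", 3: "ok", 4: "empty"}[best]
-- ===== Notes on version B (the rewrite author's own statement) =====
-- stated objective: alternative
-- what changed: Replaces the three separate any() scans with one single pass keeping a running minimum priority rank (error=1, partial=2, ok=3, unknown=4) and inverting the best rank at the end; empty and all-unknown lists both naturally leave best=4 -> "empty".
import Mathlib
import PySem

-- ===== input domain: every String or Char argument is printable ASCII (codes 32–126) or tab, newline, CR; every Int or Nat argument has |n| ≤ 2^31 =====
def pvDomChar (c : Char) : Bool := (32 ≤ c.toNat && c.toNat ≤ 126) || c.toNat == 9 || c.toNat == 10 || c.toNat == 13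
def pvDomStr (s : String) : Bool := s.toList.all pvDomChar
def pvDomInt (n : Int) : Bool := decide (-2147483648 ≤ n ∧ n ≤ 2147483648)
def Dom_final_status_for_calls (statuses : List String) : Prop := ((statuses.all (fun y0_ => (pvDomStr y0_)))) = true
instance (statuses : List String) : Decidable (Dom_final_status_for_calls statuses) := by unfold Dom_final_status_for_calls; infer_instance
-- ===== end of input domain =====

-- B replaces A's three any() scans with one single pass keeping a running minimum rank (alternative decomposition, same cost).


-- ===== PORT A =====
def final_status_for_calls (statuses : List String) : String :=
  if statuses = [] then "empty"
  else if statuses.any (fun status => status == "error") then "error"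
  else if statuses.any (fun status => status == "partial") then "partial"
  else if statuses.any (fun status => status == "ok") then "ok"
  else "empty"

-- ===== PORT B =====
-- rank.get(s, 4)
def pvRank (s : String) : Nat :=
  if s = "error" then 1 else if s = "partial" then 2 else if s = "ok" then 3 else 4
-- {1: "error", 2: "partial", 3: "ok", 4: "empty"}[best]
def pvInvRank (n : Nat) : String :=
  if n = 1 then "error" else if n = 2 then "partial" else if n = 3 then "ok" else "empty"

def final_status_for_calls_alt (statuses : List String) : String :=
  pvInvRank (statuses.foldl (fun best s => let r := pvRank s; if r < best then r else best) 4)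

-- ===== PRECONDITION & SPEC =====
def Spec_final_status_for_calls (statuses : List String) (out : String) : Prop := out = final_status_for_calls_alt statuses
instance (statuses : List String) (out : String) : Decidable (Spec_final_status_for_calls statuses out) := by unfold Spec_final_status_for_calls; infer_instance

-- ===== CLAIM (what is proved, stated in full; the proofs are below) =====
def Claim_equal_final_status_for_calls : Prop := ∀ (statuses : List String), Dom_final_status_for_calls statuses → Spec_final_status_for_calls statuses (final_status_for_calls statuses)

-- ===== LEMMAS AND PROOFS =====

-- the best rank reachable from a list, expressed via A's any-tests
def pvGval (l : List String) : Nat :=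
  if l.any (fun s => s == "error") then 1
  else if l.any (fun s => s == "partial") then 2
  else if l.any (fun s => s == "ok") then 3
  else 4

theorem pvGval_le (l : List String) : pvGval l ≤ 4 := by
  unfold pvGval; split_ifs <;> omega

theorem pvGval_cons (s : String) (l : List String) :
    pvGval (s :: l) = min (pvRank s) (pvGval l) := by
  by_cases h1 : s = "error" <;> by_cases h2 : s = "partial" <;> by_cases h3 : s = "ok" <;>
    simp [pvGval, pvRank, h1, h2, h3, List.any_cons] <;> split_ifs <;> omega

theorem pvFoldl_char (l : List String) : ∀ b : Nat, b ≤ 4 →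
    l.foldl (fun best s => let r := pvRank s; if r < best then r else best) b
      = min b (pvGval l) := by
  induction l with
  | nil => intro b hb; simp [pvGval]; omega
  | cons s t ih =>
    intro b hb
    have hr : pvRank s ≤ 4 := by unfold pvRank; split_ifs <;> omega
    have step : (if pvRank s < b then pvRank s else b) = min b (pvRank s) := by split <;> omega
    simp only [List.foldl_cons]
    rw [ih _ (by omega : (if pvRank s < b then pvRank s else b) ≤ 4), step, pvGval_cons]
    omega

theorem final_status_for_calls_spec : Claim_equal_final_status_for_calls := by
  intro l _
  unfold Spec_final_status_for_calls final_status_for_calls_alt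
  rw [pvFoldl_char l 4 (le_refl 4)]
  have h4 : min 4 (pvGval l) = pvGval l := by have := pvGval_le l; omega
  rw [h4]
  cases l with
  | nil => rfl
  | cons s t =>
    simp only [final_status_for_calls, pvGval, pvInvRank]
    split_ifs <;> simp_all
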